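-- pv_equiv track=rewrite | github.com/muskankapoor/fall2017projects | Python/word_list.py | buildWordList
-- ===== SOURCE A (Python) =====
-- def buildWordList(text):
--     l = [] #empty list
--     d = {} #empty dictionary
--     for w in text.split():
--         w = w.lower()
--         word = ''
--         for x in w:
--             if x.isalpha():
--                 word += x
--         if word != '':
--             l.append(word)
--     return l
-- ===== SOURCE B (Python) =====
-- def buildWordList(text):
--     words = []
--     buf = ''
--     for c in text:
--         if c.isspace():
--             if buf:
--                 words.append(buf)
--             buf = ''
--         elif c.isalpha():
--             buf += c.lower()
--     if buf:
--         words.append(buf)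
--     return words
-- ===== Notes on version B (the rewrite author's own statement) =====
-- stated objective: alternative
-- what changed: Replaced split()-then-nested-filter-loop with a single stateful character scan that flushes a growing buffer at whitespace and appends lowercased letters otherwise.
import Mathlib
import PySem

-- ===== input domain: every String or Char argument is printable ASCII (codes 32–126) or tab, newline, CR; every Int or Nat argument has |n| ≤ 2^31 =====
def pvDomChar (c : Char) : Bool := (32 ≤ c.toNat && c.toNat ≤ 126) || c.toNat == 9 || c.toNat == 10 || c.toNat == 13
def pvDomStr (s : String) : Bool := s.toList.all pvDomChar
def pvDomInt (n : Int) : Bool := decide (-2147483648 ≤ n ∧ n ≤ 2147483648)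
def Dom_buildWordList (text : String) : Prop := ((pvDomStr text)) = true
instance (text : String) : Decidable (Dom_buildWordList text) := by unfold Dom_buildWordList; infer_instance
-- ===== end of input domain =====

-- B replaces A's split()-plus-nested-filter-loop by a single stateful character scan (same cost, different decomposition).

-- ===== PORT A =====
-- transliteration of A: for w in text.split(): w = w.lower(); word accumulates the alpha chars; append word if non-empty
def buildWordList (text : String) : List String :=
  (PySem.Str.split₀ text).foldl (fun l w =>
    let wlow := PySem.Str.lower w
    let word := wlow.toList.foldl
      (fun word x => if PySem.Chars.isalpha x then word ++ [x] else word) ([] : List Char)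
    if word ≠ [] then l ++ [String.ofList word] else l) []

-- ===== PORT B =====
-- transliteration of B: one scan, state = (pending buffer, words so far); flush at whitespace and at the end
def altLoop : List Char → List Char → List String → List String
  | [], buf, words => if buf = [] then words else words ++ [String.ofList buf]
  | c :: cs, buf, words =>
    if PySem.Chars.isspace c then
      altLoop cs [] (if buf = [] then words else words ++ [String.ofList buf])
    else if PySem.Chars.isalpha c then
      altLoop cs (buf ++ [PySem.Chars.lowerChar c]) words
    else
      altLoop cs buf words

def buildWordList_alt (text : String) : List String := altLoop text.toList [] []

-- ===== PRECONDITION & SPEC =====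
def Spec_buildWordList (text : String) (out : List String) : Prop := out = buildWordList_alt text
instance (text : String) (out : List String) : Decidable (Spec_buildWordList text out) := by unfold Spec_buildWordList; infer_instance

-- ===== CLAIM (what is proved, stated in full; the proofs are below) =====
def Claim_equal_buildWordList : Prop := ∀ (text : String), Dom_buildWordList text → Spec_buildWordList text (buildWordList text)

-- ===== LEMMAS AND PROOFS =====

-- per-token value both programs produce: the lowered letters of the token
def pvAW (w : List Char) : List Char :=
  (w.filter PySem.Chars.isalpha).map PySem.Chars.lowerChar

-- tokens both programs keep
def pvKeep (w : List Char) : Bool := decide (pvAW w ≠ [])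

theorem pvAW_nil : pvAW [] = [] := rfl

theorem pvAW_snoc (xs : List Char) (c : Char) :
    pvAW (xs ++ [c]) =
      pvAW xs ++ (if PySem.Chars.isalpha c then [PySem.Chars.lowerChar c] else []) := by
  by_cases h : PySem.Chars.isalpha c = true <;> simp [pvAW, List.filter_append, h]

theorem pv_isalpha_lowerChar (c : Char) :
    PySem.Chars.isalpha (PySem.Chars.lowerChar c) = PySem.Chars.isalpha c := by
  by_cases h : PySem.Chars.isupper c = true
  · have hc : 65 ≤ c.toNat ∧ c.toNat ≤ 90 := by
      have := h
      simp only [PySem.Chars.isupper, Bool.and_eq_true, decide_eq_true_eq, Char.le_def] at this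
      exact ⟨this.1, this.2⟩
    have hv : (c.toNat + 32).isValidChar := Or.inl (by omega)
    have hval : (Char.ofNat (c.toNat + 32)).toNat = c.toNat + 32 := by
      rw [Char.ofNat, dif_pos hv]
      simp only [Char.ofNatAux, Char.toNat, UInt32.toNat, BitVec.toNat_ofNatLT]
    have halpha : PySem.Chars.isalpha c = true := by
      simp [PySem.Chars.isalpha, h]
    rw [halpha]
    simp only [PySem.Chars.lowerChar, h, if_pos]
    simp only [PySem.Chars.isalpha, PySem.Chars.isupper, PySem.Chars.islower,
      Char.le_def, Bool.or_eq_true, Bool.and_eq_true, decide_eq_true_eq]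
    right
    have hvt : (Char.ofNat (c.toNat + 32)).val.toNat = c.toNat + 32 := hval
    refine ⟨?_, ?_⟩ <;> rw [UInt32.le_iff_toNat_le] <;> rw [hvt]
    · show 97 ≤ _; omega
    · show _ ≤ 122; omega
  · simp [PySem.Chars.lowerChar, h]

-- A lowers first and then filters; that equals filtering first and lowering the kept letters
theorem pv_filter_lower (w : List Char) :
    (PySem.Chars.lower w).filter PySem.Chars.isalpha = pvAW w := by
  unfold PySem.Chars.lower pvAW
  rw [List.filter_map]
  congr 1
  apply List.filter_congr
  intro c _
  simp [pv_isalpha_lowerChar]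

theorem altLoop_acc (cs : List Char) : ∀ buf res,
    altLoop cs buf res = res ++ altLoop cs buf [] := by
  induction cs with
  | nil => intro buf res; by_cases h : buf = [] <;> simp [altLoop, h]
  | cons c cs ih =>
    intro buf res
    by_cases hs : PySem.Chars.isspace c = true
    · by_cases h : buf = [] <;>
        simp [altLoop, hs, h, ih [] res, ih [] (res ++ [String.ofList buf]),
          ih [] [String.ofList buf]]
    · by_cases ha : PySem.Chars.isalpha c = true <;>
        simp [altLoop, hs, ha, ih (buf ++ [PySem.Chars.lowerChar c]) res, ih buf res]

theorem splitgo_acc (cs : List Char) : ∀ cur acc,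
    PySem.Chars.split₀.go cs cur acc = acc.reverse ++ PySem.Chars.split₀.go cs cur [] := by
  induction cs with
  | nil =>
    intro cur acc
    by_cases h : cur.isEmpty = true <;> simp [PySem.Chars.split₀.go, h]
  | cons c cs ih =>
    intro cur acc
    by_cases hs : PySem.Chars.isspace c = true
    · by_cases h : cur.isEmpty = true <;>
        simp [PySem.Chars.split₀.go, hs, h, ih [] acc, ih [] (cur.reverse :: acc),
          ih [] [cur.reverse]]
    · simp [PySem.Chars.split₀.go, hs, ih (c :: cur) acc]

-- the heart: B's scan with buffer pvAW(cur.reverse) computes A's filter-map over the remaining split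
theorem pv_key (cs : List Char) : ∀ cur,
    altLoop cs (pvAW cur.reverse) [] =
      ((PySem.Chars.split₀.go cs cur []).filter pvKeep).map (fun w => String.ofList (pvAW w)) := by
  induction cs with
  | nil =>
    intro cur
    by_cases h : cur.isEmpty = true
    · have hc : cur = [] := by simpa [List.isEmpty_iff] using h
      simp [hc, altLoop, PySem.Chars.split₀.go, pvAW_nil]
    · by_cases hb : pvAW cur.reverse = [] <;>
        simp [altLoop, PySem.Chars.split₀.go, h, hb, pvKeep]
  | cons c cs ih =>
    intro cur
    by_cases hs : PySem.Chars.isspace c = true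
    · by_cases h : cur.isEmpty = true
      · have hc : cur = [] := by simpa [List.isEmpty_iff] using h
        have := ih []
        simp only [List.reverse_nil, pvAW_nil] at this
        calc altLoop (c :: cs) (pvAW cur.reverse) [] = altLoop cs [] [] := by
              simp [hc, altLoop, hs, pvAW_nil]
          _ = _ := by
              rw [this]
              simp [PySem.Chars.split₀.go, hs, h]
      · rw [show PySem.Chars.split₀.go (c :: cs) cur [] =
            PySem.Chars.split₀.go cs [] [cur.reverse] by simp [PySem.Chars.split₀.go, hs, h]]
        rw [splitgo_acc cs [] [cur.reverse]]
        have hih := ih []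
        simp only [List.reverse_nil, pvAW_nil] at hih
        by_cases hb : pvAW cur.reverse = []
        · calc altLoop (c :: cs) (pvAW cur.reverse) [] = altLoop cs [] [] := by
                simp [altLoop, hs, hb]
            _ = _ := by rw [hih]; simp [pvKeep, hb]
        · calc altLoop (c :: cs) (pvAW cur.reverse) []
              = [String.ofList (pvAW cur.reverse)] ++ altLoop cs [] [] := by
                rw [show altLoop (c :: cs) (pvAW cur.reverse) [] =
                    altLoop cs [] [String.ofList (pvAW cur.reverse)] by simp [altLoop, hs, hb]]
                exact altLoop_acc cs [] [String.ofList (pvAW cur.reverse)]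
            _ = _ := by rw [hih]; simp [pvKeep, hb]
    · have hgo : PySem.Chars.split₀.go (c :: cs) cur [] = PySem.Chars.split₀.go cs (c :: cur) [] := by
        simp [PySem.Chars.split₀.go, hs]
      by_cases ha : PySem.Chars.isalpha c = true
      · calc altLoop (c :: cs) (pvAW cur.reverse) []
            = altLoop cs (pvAW (c :: cur).reverse) [] := by
              simp [altLoop, hs, ha, pvAW_snoc]
          _ = _ := by rw [ih (c :: cur), hgo]
      · calc altLoop (c :: cs) (pvAW cur.reverse) []
            = altLoop cs (pvAW (c :: cur).reverse) [] := by
              simp [altLoop, hs, ha, pvAW_snoc]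
          _ = _ := by rw [ih (c :: cur), hgo]

-- A's fold, characterised: filter the split tokens by pvKeep and map each to its lowered letters
theorem buildWordList_eq (text : String) :
    buildWordList text =
      ((PySem.Chars.split₀ text.toList).filter pvKeep).map (fun w => String.ofList (pvAW w)) := by
  unfold buildWordList
  rw [PySem.Str.split₀, List.foldl_map]
  have hfun : (fun (l : List String) (w : List Char) =>
      (fun (l : List String) (w : String) =>
        let wlow := PySem.Str.lower w
        let word := wlow.toList.foldl
          (fun word x => if PySem.Chars.isalpha x then word ++ [x] else word) ([] : List Char)
        if word ≠ [] then l ++ [String.ofList word] else l) l (String.ofList w)) =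
      (fun l w => if pvKeep w then l ++ [String.ofList (pvAW w)] else l) := by
    funext l w
    have hw : (PySem.Str.lower (String.ofList w)).toList.foldl
        (fun word x => if PySem.Chars.isalpha x then word ++ [x] else word) ([] : List Char) =
        pvAW w := by
      rw [PySem.List.foldl_append_if_eq_filter]
      rw [show (PySem.Str.lower (String.ofList w)).toList = PySem.Chars.lower w by
        simp [PySem.Str.toList_lower]]
      simpa using pv_filter_lower w
    dsimp only
    rw [hw]
    by_cases hb : pvAW w = [] <;> simp [pvKeep, hb]
  rw [hfun, PySem.List.foldl_append_if pvKeep (fun w => String.ofList (pvAW w))]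
  simp

-- ===== VERDICT (by name: the statement is the Claim_ definition above) =====
theorem buildWordList_spec : Claim_equal_buildWordList := by
  intro text _
  unfold Spec_buildWordList buildWordList_alt
  rw [buildWordList_eq]
  have := pv_key text.toList []
  simp only [List.reverse_nil, pvAW_nil] at this
  rw [this, PySem.Chars.split₀]
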